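-- pv_equiv track=rewrite | github.com/endlesstory0428/REU | forceFirectedLayout/getMulti.py | getMulti
-- ===== SOURCE A (Python) =====
-- from collections import defaultdict
--
-- def getMulti(edgeList):
-- 	multiDict = defaultdict(int)
-- 	direcDict = defaultdict(int)
-- 	for x, y in edgeList:
-- 		if x < y:
-- 			direcDict[(x, y)] += 1
-- 			multiDict[(x, y)] += 1
-- 		else:
-- 			direcDict[(y, x)] -= 1
-- 			multiDict[(y, x)] += 1
--
-- 	multiEdgeDataList = []
-- 	for x, y in sorted(multiDict.keys()):
-- 		value = multiDict[(x, y)]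
-- 		direction = direcDict[(x, y)]
-- 		cycle = (value - abs(direction)) // 2
-- 		rowData = {'source': x, 'target': y, 'value': value, 'direction': direction, 'cycle': cycle}
-- 		multiEdgeDataList.append(rowData)
-- 	return multiEdgeDataList
-- ===== SOURCE B (Python) =====
-- def getMulti(edgeList):
-- 	pairs = sorted((((x, y), 1) if x < y else ((y, x), -1) for x, y in edgeList), key=lambda p: p[0])
-- 	result = []
-- 	i, n = 0, len(pairs)
-- 	while i < n:
-- 		key = pairs[i][0]
-- 		direction = pairs[i][1]
-- 		j = i + 1
-- 		while j < n and pairs[j][0] == key: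
-- 			direction += pairs[j][1]
-- 			j += 1
-- 		value = j - i
-- 		cycle = (value - abs(direction)) // 2
-- 		result.append({'source': key[0], 'target': key[1], 'value': value, 'direction': direction, 'cycle': cycle})
-- 		i = j
-- 	return result
-- ===== Notes on version B (the rewrite author's own statement) =====
-- stated objective: alternative
-- what changed: Replaces A's two defaultdict accumulators followed by a key sort with a sort-first pipeline: map each edge to a (normalized key, sign) pair, sort the pairs by key, then one grouped scan over runs of equal keys computing value, direction and cycle per run.
import Mathlib
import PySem

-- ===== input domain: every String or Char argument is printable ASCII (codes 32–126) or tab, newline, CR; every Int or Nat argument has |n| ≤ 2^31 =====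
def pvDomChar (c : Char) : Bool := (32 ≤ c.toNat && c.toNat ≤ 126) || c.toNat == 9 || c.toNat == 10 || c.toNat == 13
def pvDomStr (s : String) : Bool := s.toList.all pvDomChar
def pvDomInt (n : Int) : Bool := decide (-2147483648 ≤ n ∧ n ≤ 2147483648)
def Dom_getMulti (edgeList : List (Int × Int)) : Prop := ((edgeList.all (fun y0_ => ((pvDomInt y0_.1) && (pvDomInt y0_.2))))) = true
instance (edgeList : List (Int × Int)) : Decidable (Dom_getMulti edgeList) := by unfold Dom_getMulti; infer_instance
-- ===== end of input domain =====

-- B sorts the (normalized key, sign) pairs first and emits one record per run of equal keys in a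
-- single grouped scan, instead of A's two accumulator dicts plus a key sort (objective: alternative).

-- ===== PORT A =====
-- multiDict/direcDict accumulation loop, then sorted(multiDict.keys()) with an append loop.
def getMulti (edgeList : List (Int × Int)) : List (List (String × Int)) :=
  let dicts := edgeList.foldl (fun st e =>
    if e.1 < e.2 then
      (st.1.modify (e.1, e.2) 0 (· + 1), st.2.modify (e.1, e.2) 0 (· + 1))
    else
      (st.1.modify (e.2, e.1) 0 (· + 1), st.2.modify (e.2, e.1) 0 (· - 1)))
    ((PySem.Dict.empty : PySem.Dict (Int × Int) Int), (PySem.Dict.empty : PySem.Dict (Int × Int) Int))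
  (PySem.List.sorted2 dicts.1.keys (fun k => k.1) (fun k => k.2) false).foldl (fun acc k =>
    let value := dicts.1.getD k 0
    let direction := dicts.2.getD k 0
    let cycle := PySem.Int.floordiv (value - |direction|) 2
    acc ++ [[("source", k.1), ("target", k.2), ("value", value), ("direction", direction), ("cycle", cycle)]]) []

-- ===== PORT B =====
-- the row dict appended for one group of equal keys
def mkRow (key : Int × Int) (value direction : Int) : List (String × Int) :=
  [("source", key.1), ("target", key.2), ("value", value), ("direction", direction),
   ("cycle", PySem.Int.floordiv (value - |direction|) 2)]

-- the inner while-loop: consume the run of pairs sharing the head's key, emit its row, recurse on the rest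
def groupRows : List ((Int × Int) × Int) → List (List (String × Int))
  | [] => []
  | p :: rest =>
      mkRow p.1 (1 + ((rest.takeWhile (fun q => q.1 == p.1)).length : Int))
        (p.2 + ((rest.takeWhile (fun q => q.1 == p.1)).map (fun q => q.2)).sum)
        :: groupRows (rest.dropWhile (fun q => q.1 == p.1))
  termination_by ps => ps.length
  decreasing_by simpa using Nat.lt_succ_of_le (List.length_dropWhile_le _ _)

def getMulti_alt (edgeList : List (Int × Int)) : List (List (String × Int)) :=
  groupRows (PySem.List.sorted2
    (edgeList.map (fun e => if e.1 < e.2 then ((e.1, e.2), (1 : Int)) else ((e.2, e.1), (-1 : Int))))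
    (fun p => p.1.1) (fun p => p.1.2) false)

-- ===== PRECONDITION & SPEC =====
def Spec_getMulti (edgeList : List (Int × Int)) (out : List (List (String × Int))) : Prop := out = getMulti_alt edgeList
instance (edgeList : List (Int × Int)) (out : List (List (String × Int))) : Decidable (Spec_getMulti edgeList out) := by unfold Spec_getMulti; infer_instance

-- ===== CLAIM (what is proved, stated in full; the proofs are below) =====
def Claim_equal_getMulti : Prop := ∀ (edgeList : List (Int × Int)), Dom_getMulti edgeList → Spec_getMulti edgeList (getMulti edgeList)

-- ===== LEMMAS AND PROOFS =====

-- proof-side names for the normalized key and the sign of an edge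
def pvKey (e : Int × Int) : Int × Int := if e.1 < e.2 then (e.1, e.2) else (e.2, e.1)
def pvSign (e : Int × Int) : Int := if e.1 < e.2 then (1 : Int) else (-1 : Int)
-- the sorted-key order: lexicographic on the pair
def pvPairLe (a b : (Int × Int) × Int) : Prop := (toLex a.1 : Lex (Int × Int)) ≤ toLex b.1
-- the record emitted for key k when the pair list is ps
def pvRowOf (ps : List ((Int × Int) × Int)) (k : Int × Int) : List (String × Int) :=
  mkRow k ((ps.map (fun p => p.1)).count k : Int) ((ps.filter (fun p => p.1 == k)).map (fun p => p.2)).sum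
-- the key list B's grouped scan walks
def keysOf : List ((Int × Int) × Int) → List (Int × Int)
  | [] => []
  | p :: rest => p.1 :: keysOf (rest.dropWhile (fun q => q.1 == p.1))
  termination_by ps => ps.length
  decreasing_by simpa using Nat.lt_succ_of_le (List.length_dropWhile_le _ _)

lemma pvPf1 (e : Int × Int) :
    (if e.1 < e.2 then ((e.1, e.2), (1 : Int)) else ((e.2, e.1), (-1 : Int))).1 = pvKey e := by
  by_cases h : e.1 < e.2 <;> simp [pvKey, h]

lemma pvPredEq (k : Int × Int) :
    (fun x : Int × Int => (if x.1 < x.2 then (x, (1 : Int)) else ((x.2, x.1), (-1 : Int))).1 == k)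
      = (fun x => pvKey x == k) := by
  funext x; by_cases h : x.1 < x.2 <;> simp [pvKey, h]

lemma pvFunEq :
    (fun x : Int × Int => (if x.1 < x.2 then (x, (1 : Int)) else ((x.2, x.1), (-1 : Int))).2)
      = pvSign := by
  funext x; by_cases h : x.1 < x.2 <;> simp [pvSign, h]

-- A's one loop over a pair of dicts is the pair of two single-dict loops keyed by pvKey
lemma pvFoldPair (l : List (Int × Int)) (dm dd : PySem.Dict (Int × Int) Int) :
    l.foldl (fun st e =>
      if e.1 < e.2 then
        (st.1.modify (e.1, e.2) 0 (· + 1), st.2.modify (e.1, e.2) 0 (· + 1))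
      else
        (st.1.modify (e.2, e.1) 0 (· + 1), st.2.modify (e.2, e.1) 0 (· - 1))) (dm, dd)
    = (l.foldl (fun d e => d.modify (pvKey e) 0 (· + 1)) dm,
       l.foldl (fun d e => d.modify (pvKey e) 0 (· + pvSign e)) dd) := by
  induction l generalizing dm dd with
  | nil => rfl
  | cons e l ih =>
      by_cases h : e.1 < e.2
      · have hk : pvKey e = (e.1, e.2) := by simp [pvKey, h]
        have hs : pvSign e = 1 := by simp [pvSign, h]
        simp only [List.foldl_cons, if_pos h]
        rw [ih]
        simp only [hk, hs]
      · have hk : pvKey e = (e.2, e.1) := by simp [pvKey, h]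
        have hs : pvSign e = -1 := by simp [pvSign, h]
        simp only [List.foldl_cons, if_neg h]
        rw [ih]
        simp only [hk, hs, sub_eq_add_neg]

-- a modify-accumulate loop over (key, weight) pairs sums the weights recorded at each key
lemma pvGetDSum (l : List ((Int × Int) × Int)) (d : PySem.Dict (Int × Int) Int) (k : Int × Int) :
    (l.foldl (fun d p => d.modify p.1 0 (· + p.2)) d).getD k 0
      = d.getD k 0 + ((l.filter (fun p => p.1 == k)).map (fun p => p.2)).sum := by
  induction l generalizing d with
  | nil => simp
  | cons p l ih =>
      simp only [List.foldl_cons, ih, List.filter_cons]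
      by_cases h : p.1 = k
      · simp only [h, beq_self_eq_true, if_pos, List.map_cons, List.sum_cons,
          PySem.Dict.getD_modify]
        omega
      · have hb : (p.1 == k) = false := by simp [h]
        have h2 : ¬ k = p.1 := fun hk => h hk.symm
        simp only [hb, Bool.false_eq_true, if_false, PySem.Dict.getD_modify]
        rw [if_neg h2]

-- multiDict lookup = multiplicity of the key
lemma pvVal (l : List (Int × Int)) (d : PySem.Dict (Int × Int) Int) (k : Int × Int) :
    (l.foldl (fun d e => d.modify (pvKey e) 0 (· + 1)) d).getD k 0
      = d.getD k 0 + ((l.map pvKey).count k : Int) := by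
  have h := PySem.Dict.getD_foldl_modify_add_one (l := l.map pvKey) (d := d) (v := k)
  rw [List.foldl_map] at h
  exact h

-- direcDict lookup = sum of signs at the key
lemma pvDir (l : List (Int × Int)) (d : PySem.Dict (Int × Int) Int) (k : Int × Int) :
    (l.foldl (fun d e => d.modify (pvKey e) 0 (· + pvSign e)) d).getD k 0
      = d.getD k 0 + ((l.filter (fun e => pvKey e == k)).map pvSign).sum := by
  have h := pvGetDSum (l.map (fun e => (pvKey e, pvSign e))) d k
  rw [List.foldl_map] at h
  simpa [List.filter_map, List.map_map, Function.comp_def] using h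

-- multiDict's key list
lemma pvKeys (l : List (Int × Int)) (d : PySem.Dict (Int × Int) Int) :
    (l.foldl (fun d e => d.modify (pvKey e) 0 (· + 1)) d).keys
      = PySem.Set.update d.keys (l.map pvKey) :=
  PySem.Dict.keys_foldl_modify_key (key := pvKey) (f := fun _ _ => (· + 1)) (d0 := 0) (l := l) (d := d)

-- insertion sort with a lex-lt before-test keeps the list Pairwise lex-le
lemma pvFoldlInsertPairwise {α κ : Type} [LinearOrder κ] (key : α → κ) :
    ∀ (xs acc : List α), acc.Pairwise (fun a b => key a ≤ key b) →
      (xs.foldl (fun acc x => PySem.List.insertBy (fun a b => decide (key a < key b)) x acc) acc).Pairwise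
        (fun a b => key a ≤ key b) := by
  intro xs
  induction xs with
  | nil => intro acc h; simpa using h
  | cons x xs ih =>
      intro acc h
      exact ih _ (PySem.List.insertBy_pairwise_le key x acc h)

-- sorted2 with two Int keys is sorted in the lexicographic order of the key pair
lemma pvSorted2Pairwise {α : Type} (xs : List α) (k1 k2 : α → Int) :
    (PySem.List.sorted2 xs k1 k2 false).Pairwise
      (fun a b => (toLex (k1 a, k2 a) : Lex (Int × Int)) ≤ toLex (k1 b, k2 b)) := by
  have hbe : (fun a b : α => decide (k1 a < k1 b) || (!decide (k1 b < k1 a) && decide (k2 a < k2 b)))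
      = fun a b => decide ((toLex (k1 a, k2 a) : Lex (Int × Int)) < toLex (k1 b, k2 b)) := by
    funext a b
    rcases lt_trichotomy (k1 a) (k1 b) with h | h | h <;>
      simp [Prod.Lex.lt_iff, h, not_lt_of_gt]
  have : (PySem.List.sorted2 xs k1 k2 false)
      = xs.foldl (fun acc x => PySem.List.insertBy
          (fun a b => decide ((toLex (k1 a, k2 a) : Lex (Int × Int)) < toLex (k1 b, k2 b))) x acc) [] := by
    simp only [PySem.List.sorted2, Bool.false_eq_true, if_false, hbe]
  rw [this]
  exact pvFoldlInsertPairwise (fun a => (toLex (k1 a, k2 a) : Lex (Int × Int))) xs [] (by simp)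

-- every pair surviving the dropWhile has a key strictly above the head's key
lemma pvNextKeys {p : (Int × Int) × Int} {rest : List ((Int × Int) × Int)}
    (h : (p :: rest).Pairwise pvPairLe) :
    ∀ q ∈ rest.dropWhile (fun q => q.1 == p.1), (toLex p.1 : Lex (Int × Int)) < toLex q.1 := by
  intro q hq
  rcases List.pairwise_cons.mp h with ⟨hhead, htail⟩
  have hsub : (rest.dropWhile (fun q => q.1 == p.1)).Sublist rest := List.dropWhile_sublist _
  cases hn : rest.dropWhile (fun q : (Int × Int) × Int => q.1 == p.1) with
  | nil => rw [hn] at hq; cases hq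
  | cons q0 nx =>
      have hne : (rest.dropWhile (fun q => q.1 == p.1)) ≠ [] := by rw [hn]; simp
      have hq0 : (q0.1 == p.1) = false := by
        have := List.head_dropWhile_not (fun q : (Int × Int) × Int => q.1 == p.1) hne
        rwa [show (rest.dropWhile (fun q => q.1 == p.1)).head hne = q0 by simp [hn]] at this
      have hq0mem : q0 ∈ rest := hsub.mem (by rw [hn]; exact List.mem_cons_self)
      have hlt0 : (toLex p.1 : Lex (Int × Int)) < toLex q0.1 := by
        have hle : (toLex p.1 : Lex (Int × Int)) ≤ toLex q0.1 := hhead q0 hq0mem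
        have hne2 : (toLex p.1 : Lex (Int × Int)) ≠ toLex q0.1 := by
          intro he
          exact absurd (toLex.injective he).symm (by simpa using hq0)
        exact lt_of_le_of_ne hle hne2
      rw [hn] at hq
      rcases List.mem_cons.mp hq with rfl | hq'
      · exact hlt0
      · have hpw : (q0 :: nx).Pairwise pvPairLe := hn ▸ htail.sublist hsub
        exact lt_of_lt_of_le hlt0 ((List.pairwise_cons.mp hpw).1 q hq')

-- keys emitted by the grouped scan all occur in the pair list
lemma pvKeysOfSubset : ∀ ps : List ((Int × Int) × Int), ∀ k ∈ keysOf ps, k ∈ ps.map (fun p => p.1) := by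
  intro ps
  induction ps using keysOf.induct with
  | case1 => intro k hk; rw [keysOf] at hk; cases hk
  | case2 p rest ih =>
      intro k hk
      rw [keysOf] at hk
      rcases List.mem_cons.mp hk with rfl | hk'
      · exact List.mem_map_of_mem List.mem_cons_self
      · have := ih k hk'
        have hsub : ((rest.dropWhile (fun q => q.1 == p.1)).map (fun p => p.1)).Sublist
            (rest.map (fun p => p.1)) := (List.dropWhile_sublist _).map _
        exact List.mem_cons_of_mem _ (hsub.mem this)

-- on a key-sorted list every occurring key is emitted
lemma pvMemKeysOf : ∀ ps : List ((Int × Int) × Int), ps.Pairwise pvPairLe →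
    ∀ k ∈ ps.map (fun p => p.1), k ∈ keysOf ps := by
  intro ps
  induction ps using keysOf.induct with
  | case1 => intro _ k hk; cases hk
  | case2 p rest ih =>
      intro hpw k hk
      rw [keysOf]
      rcases List.mem_map.mp hk with ⟨q, hqmem, rfl⟩
      rcases List.mem_cons.mp hqmem with rfl | hq'
      · exact List.mem_cons_self
      · by_cases he : q.1 = p.1
        · rw [he]; exact List.mem_cons_self
        · have hrest : rest = rest.takeWhile (fun q => q.1 == p.1) ++ rest.dropWhile (fun q => q.1 == p.1) :=
            (List.takeWhile_append_dropWhile).symm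
          rcases List.mem_append.mp (hrest ▸ hq') with hrun | hnext
          · have h1 := List.mem_takeWhile_imp (p := fun q : (Int × Int) × Int => q.1 == p.1) (l := rest) hrun
            exact absurd (by simpa using h1) he
          · have hpw' : (rest.dropWhile (fun q => q.1 == p.1)).Pairwise pvPairLe :=
              (List.pairwise_cons.mp hpw).2.sublist (List.dropWhile_sublist _)
            exact List.mem_cons_of_mem _ (ih hpw' q.1 (List.mem_map_of_mem hnext))

-- on a key-sorted list the emitted key list is strictly increasing
lemma pvKeysOfPairwise : ∀ ps : List ((Int × Int) × Int), ps.Pairwise pvPairLe →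
    (keysOf ps).Pairwise (fun a b => (toLex a : Lex (Int × Int)) < toLex b) := by
  intro ps
  induction ps using keysOf.induct with
  | case1 => intro _; rw [keysOf]; exact List.Pairwise.nil
  | case2 p rest ih =>
      intro hpw
      rw [keysOf]
      have hpw' : (rest.dropWhile (fun q => q.1 == p.1)).Pairwise pvPairLe :=
        (List.pairwise_cons.mp hpw).2.sublist (List.dropWhile_sublist _)
      refine List.pairwise_cons.mpr ⟨?_, ih hpw'⟩
      intro k hk
      rcases List.mem_map.mp (pvKeysOfSubset _ k hk) with ⟨q, hq, rfl⟩
      exact pvNextKeys hpw q hq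

-- count of the head key in a key-sorted list = 1 + length of the head run
lemma pvCountHead {p : (Int × Int) × Int} {rest : List ((Int × Int) × Int)}
    (h : (p :: rest).Pairwise pvPairLe) :
    (((p :: rest).map (fun q => q.1)).count p.1 : Int)
      = 1 + ((rest.takeWhile (fun q => q.1 == p.1)).length : Int) := by
  have hrest : rest = rest.takeWhile (fun q => q.1 == p.1) ++ rest.dropWhile (fun q => q.1 == p.1) :=
    (List.takeWhile_append_dropWhile).symm
  have hrun : ((rest.takeWhile (fun q => q.1 == p.1)).map (fun q => q.1)).count p.1
      = (rest.takeWhile (fun q => q.1 == p.1)).length := by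
    have hall : ∀ b ∈ (rest.takeWhile (fun q => q.1 == p.1)).map (fun q => q.1), p.1 = b := by
      intro b hb
      rcases List.mem_map.mp hb with ⟨q, hq, rfl⟩
      have h1 := List.mem_takeWhile_imp (p := fun q : (Int × Int) × Int => q.1 == p.1) (l := rest) hq
      exact (show q.1 = p.1 by simpa using h1).symm
    rw [List.count_eq_length.mpr hall, List.length_map]
  have hnext : ((rest.dropWhile (fun q => q.1 == p.1)).map (fun q => q.1)).count p.1 = 0 := by
    rw [List.count_eq_zero]
    intro hmem
    rcases List.mem_map.mp hmem with ⟨q, hq, he⟩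
    have hlt := pvNextKeys h q hq
    rw [he] at hlt
    exact lt_irrefl _ hlt
  rw [List.map_cons, List.count_cons_self]
  conv_lhs => rw [hrest]
  rw [List.map_append, List.count_append, hrun, hnext]
  push_cast
  ring

-- pairs carrying the head key in a key-sorted list = the head followed by its run
lemma pvFilterHead {p : (Int × Int) × Int} {rest : List ((Int × Int) × Int)}
    (h : (p :: rest).Pairwise pvPairLe) :
    (p :: rest).filter (fun q => q.1 == p.1) = p :: rest.takeWhile (fun q => q.1 == p.1) := by
  have hrest : rest = rest.takeWhile (fun q => q.1 == p.1) ++ rest.dropWhile (fun q => q.1 == p.1) :=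
    (List.takeWhile_append_dropWhile).symm
  have hrun : (rest.takeWhile (fun q => q.1 == p.1)).filter (fun q => q.1 == p.1)
      = rest.takeWhile (fun q => q.1 == p.1) :=
    List.filter_eq_self.mpr (fun q hq => List.mem_takeWhile_imp (p := fun q : (Int × Int) × Int => q.1 == p.1) hq)
  have hnext : (rest.dropWhile (fun q => q.1 == p.1)).filter (fun q => q.1 == p.1) = [] := by
    rw [List.filter_eq_nil_iff]
    intro q hq hbad
    exact absurd ((by simpa using hbad : q.1 = p.1) ▸ pvNextKeys h q hq) (lt_irrefl _)
  rw [List.filter_cons_of_pos (p := fun q : (Int × Int) × Int => q.1 == p.1) (a := p) (l := rest) (by simp)]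
  conv_lhs => rw [hrest]
  rw [List.filter_append, hrun, hnext, List.append_nil]

-- keys strictly above the head contribute nothing from the head or its run
lemma pvRowOfLater {p : (Int × Int) × Int} {rest : List ((Int × Int) × Int)} (k : Int × Int)
    (hk : (toLex p.1 : Lex (Int × Int)) < toLex k) :
    pvRowOf (p :: rest) k = pvRowOf (rest.dropWhile (fun q => q.1 == p.1)) k := by
  have hrest : rest = rest.takeWhile (fun q => q.1 == p.1) ++ rest.dropWhile (fun q => q.1 == p.1) :=
    (List.takeWhile_append_dropWhile).symm
  have hpne : p.1 ≠ k := fun he => absurd (he ▸ hk) (lt_irrefl _)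
  have hrunc : ((rest.takeWhile (fun q => q.1 == p.1)).map (fun q => q.1)).count k = 0 := by
    rw [List.count_eq_zero]
    intro hmem
    rcases List.mem_map.mp hmem with ⟨q, hq, rfl⟩
    exact hpne ((by simpa using List.mem_takeWhile_imp hq) ▸ rfl)
  have hrunf : (rest.takeWhile (fun q => q.1 == p.1)).filter (fun q => q.1 == k) = [] := by
    rw [List.filter_eq_nil_iff]
    intro q hq hbad
    exact hpne (by
      have h1 : q.1 = p.1 := by simpa using List.mem_takeWhile_imp hq
      have h2 : q.1 = k := by simpa using hbad
      rw [← h1, h2])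
  have hc : ((p :: rest).map (fun q => q.1)).count k
      = ((rest.dropWhile (fun q => q.1 == p.1)).map (fun q => q.1)).count k := by
    rw [List.map_cons, List.count_cons_of_ne hpne]
    conv_lhs => rw [hrest]
    rw [List.map_append, List.count_append, hrunc, Nat.zero_add]
  have hf : ((p :: rest).filter (fun q => q.1 == k))
      = (rest.dropWhile (fun q => q.1 == p.1)).filter (fun q => q.1 == k) := by
    rw [List.filter_cons_of_neg (by simpa using hpne)]
    conv_lhs => rw [hrest]
    rw [List.filter_append, hrunf, List.nil_append]
  unfold pvRowOf
  rw [hc, hf]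

-- the grouped scan over a key-sorted pair list emits one record per distinct key
lemma pvGroupSpec : ∀ ps : List ((Int × Int) × Int), ps.Pairwise pvPairLe →
    groupRows ps = (keysOf ps).map (pvRowOf ps) := by
  intro ps
  induction ps using groupRows.induct with
  | case1 => intro _; rw [groupRows, keysOf]; rfl
  | case2 p rest ih =>
      intro hpw
      have hpw' : (rest.dropWhile (fun q => q.1 == p.1)).Pairwise pvPairLe :=
        (List.pairwise_cons.mp hpw).2.sublist (List.dropWhile_sublist _)
      rw [groupRows, keysOf, List.map_cons]
      refine congrArg₂ _ ?_ ?_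
      · unfold pvRowOf
        rw [pvCountHead hpw, pvFilterHead hpw]
        simp [List.map_cons]
      · rw [ih hpw']
        refine (List.map_congr_left ?_).symm
        intro k hk
        rcases List.mem_map.mp (pvKeysOfSubset _ k hk) with ⟨q, hq, rfl⟩
        exact pvRowOfLater q.1 (pvNextKeys hpw q hq)

theorem getMulti_eq (edgeList : List (Int × Int)) : getMulti edgeList = getMulti_alt edgeList := by
  -- names for the pieces
  set pairs := edgeList.map (fun e => if e.1 < e.2 then ((e.1, e.2), (1 : Int)) else ((e.2, e.1), (-1 : Int))) with hpairs
  set sp := PySem.List.sorted2 pairs (fun p => p.1.1) (fun p => p.1.2) false with hsp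
  set K := PySem.Set.ofList (pairs.map (fun p => p.1)) with hK
  set sortedK := PySem.List.sorted2 K (fun k => k.1) (fun k => k.2) false with hsortedK
  -- order facts
  have hspPw : sp.Pairwise pvPairLe := by
    have := pvSorted2Pairwise pairs (fun p => p.1.1) (fun p => p.1.2)
    simpa [pvPairLe] using this
  have hsKle : sortedK.Pairwise (fun a b => (toLex a : Lex (Int × Int)) ≤ toLex b) := by
    have := pvSorted2Pairwise K (fun k => k.1) (fun k => k.2)
    simpa using this
  have hsKnd : sortedK.Nodup := ((PySem.List.sorted2_perm K _ _ false).nodup_iff).mpr (PySem.Set.nodup_ofList _)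
  have hsKlt : sortedK.Pairwise (fun a b => (toLex a : Lex (Int × Int)) < toLex b) := by
    refine ((hsKle.and hsKnd).imp ?_)
    rintro a b ⟨hle, hne⟩
    exact lt_of_le_of_ne hle (fun he => hne (toLex.injective he))
  have hkoPw := pvKeysOfPairwise sp hspPw
  have hkoNd : (keysOf sp).Nodup :=
    hkoPw.imp (fun hlt he => absurd (he ▸ hlt) (lt_irrefl _))
  -- the emitted key list IS sorted(multiDict.keys())
  have hkeys : keysOf sp = sortedK := by
    have hmem : ∀ a, a ∈ keysOf sp ↔ a ∈ sortedK := by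
      intro a
      constructor
      · intro ha
        have := pvKeysOfSubset sp a ha
        have h2 : a ∈ pairs.map (fun p => p.1) := by
          have hperm := (PySem.List.sorted2_perm pairs (fun p => p.1.1) (fun p => p.1.2) false).map (fun p => p.1)
          exact hperm.mem_iff.mp this
        exact (PySem.List.sorted2_perm K _ _ false).mem_iff.mpr ((PySem.Set.mem_ofList _ _).mpr h2)
      · intro ha
        have h2 : a ∈ pairs.map (fun p => p.1) :=
          (PySem.Set.mem_ofList _ _).mp ((PySem.List.sorted2_perm K _ _ false).mem_iff.mp ha)
        have h3 : a ∈ sp.map (fun p => p.1) := by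
          have hperm := (PySem.List.sorted2_perm pairs (fun p => p.1.1) (fun p => p.1.2) false).map (fun p => p.1)
          exact hperm.mem_iff.mpr h2
        exact pvMemKeysOf sp hspPw a h3
    have hperm : (keysOf sp).Perm sortedK := (List.perm_ext_iff_of_nodup hkoNd hsKnd).mpr hmem
    exact PySem.List.eq_of_perm_of_pairwise_le_of_injective (fun k => (toLex k : Lex (Int × Int)))
      toLex.injective hperm (hkoPw.imp le_of_lt) hsKle
  -- the per-key record agrees between sp (B's data) and edgeList (A's dicts)
  have hrow : ∀ k, pvRowOf sp k
      = [("source", k.1), ("target", k.2), ("value", ((edgeList.map pvKey).count k : Int)),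
         ("direction", ((edgeList.filter (fun e => pvKey e == k)).map pvSign).sum),
         ("cycle", PySem.Int.floordiv ((((edgeList.map pvKey).count k : Int))
            - |((edgeList.filter (fun e => pvKey e == k)).map pvSign).sum|) 2)] := by
    intro k
    have hperm : sp.Perm pairs := PySem.List.sorted2_perm pairs _ _ false
    have hc : (sp.map (fun p => p.1)).count k = (edgeList.map pvKey).count k := by
      rw [(hperm.map (fun p => p.1)).count_eq]
      rw [hpairs, List.map_map]
      simp only [Function.comp_def, pvPf1]
    have hs : ((sp.filter (fun p => p.1 == k)).map (fun p => p.2)).sum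
        = ((edgeList.filter (fun e => pvKey e == k)).map pvSign).sum := by
      rw [((hperm.filter (fun p => p.1 == k)).map (fun p => p.2)).sum_eq]
      rw [hpairs, List.filter_map, List.map_map]
      simp only [Function.comp_def]
      rw [show (fun x : Int × Int => ((if x.1 < x.2 then ((x.1, x.2), (1:Int)) else ((x.2, x.1), (-1:Int))).1 == k)) = (fun x => pvKey x == k) from pvPredEq k,
          show (fun x : Int × Int => (if x.1 < x.2 then ((x.1, x.2), (1:Int)) else ((x.2, x.1), (-1:Int))).2) = pvSign from pvFunEq]
    unfold pvRowOf mkRow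
    rw [hc, hs]
  -- assemble
  show getMulti edgeList = groupRows sp
  rw [pvGroupSpec sp hspPw, hkeys]
  simp only [getMulti]
  rw [pvFoldPair]
  rw [PySem.List.foldl_append_singleton_eq_map]
  simp only [List.nil_append]
  have hKeq : (edgeList.foldl (fun d e => d.modify (pvKey e) 0 (· + 1)) (PySem.Dict.empty : PySem.Dict (Int × Int) Int)).keys = K := by
    rw [pvKeys]
    rw [hK, hpairs, List.map_map]
    simp only [Function.comp_def, pvPf1, PySem.Dict.keys_empty]
    rfl
  rw [hKeq]
  refine List.map_congr_left ?_
  intro k _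
  rw [hrow k]
  rw [pvVal, pvDir]
  simp only [PySem.Dict.getD_empty, zero_add]

-- ===== VERDICT (by name: the statement is the Claim_ definition above) =====
theorem getMulti_spec : Claim_equal_getMulti := by
  intro edgeList _
  unfold Spec_getMulti
  exact getMulti_eq edgeList
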